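-- pv_equiv track=rewrite | github.com/semchii/Task1Tests | task1.py | reverse_text
-- ===== SOURCE A (Python) =====
-- def reverse_text (text):
--     if not isinstance (text,str):
--         raise ValueError ('Wrong type, must use str type')
--     if len(text) < 2:
--         return text
--     reversed_text = []
--     for i in text.split():
--         alpha = []
--         not_alpha = []
--         for index, value in enumerate(i):
--             if value.isalpha():
--                 alpha.append(value)
--             else:
--                 not_alpha.append((index, value))
--         alpha.reverse()
--         for index, value in not_alpha:
--             alpha.insert(index, value)
--         reversed_txt = ''.join(alpha)
--         reversed_text.append(reversed_txt)
--     return ' '.join(reversed_text)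
-- ===== SOURCE B (Python) =====
-- def reverse_text(text):
--     if not isinstance(text, str):
--         raise ValueError('Wrong type, must use str type')
--     if len(text) < 2:
--         return text
--     words = []
--     for w in text.split():
--         letters = iter([c for c in w if c.isalpha()][::-1])
--         words.append(''.join(next(letters) if c.isalpha() else c for c in w))
--     return ' '.join(words)
-- ===== Notes on version B (the rewrite author's own statement) =====
-- stated objective: idiomatic
-- what changed: Instead of collecting alpha chars and (index,char) pairs and re-inserting the non-alpha chars by index with list.insert, B makes one pass over each word consuming a reversed-letter iterator: keep each non-alpha char where it is, take the next reversed letter otherwise.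
import Mathlib
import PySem

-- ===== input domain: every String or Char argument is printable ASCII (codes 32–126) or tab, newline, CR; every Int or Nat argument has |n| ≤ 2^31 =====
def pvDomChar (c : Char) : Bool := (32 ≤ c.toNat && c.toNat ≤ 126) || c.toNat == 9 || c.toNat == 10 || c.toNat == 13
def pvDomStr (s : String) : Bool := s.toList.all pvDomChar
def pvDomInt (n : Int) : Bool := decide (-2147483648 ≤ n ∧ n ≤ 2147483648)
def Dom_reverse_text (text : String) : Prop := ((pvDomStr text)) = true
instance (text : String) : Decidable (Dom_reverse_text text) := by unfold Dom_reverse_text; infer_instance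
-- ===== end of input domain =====

-- B reverses the letters of each word (symbols staying in place) by one pass consuming a
-- reversed-letter iterator, instead of A's rebuild-by-index-insertion; same return value.

-- ===== PORT A =====
-- per-word body of A's outer loop
def pvAWord (w : List Char) : List Char :=
  let st := (PySem.List.enumerate w).foldl
      (fun (st : List Char × List (Int × Char)) p =>
        if PySem.Chars.isalpha p.2 then (st.1 ++ [p.2], st.2) else (st.1, st.2 ++ [p]))
      ([], [])
  let alpha := st.1.reverse
  st.2.foldl (fun l p => PySem.List.insert l p.1 p.2) alpha

def reverse_text (text : String) : String :=
  if text.toList.length < 2 then text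
  else String.ofList (PySem.Chars.join [' ']
    ((PySem.Chars.split₀ text.toList).foldl (fun acc w => acc ++ [pvAWord w]) []))

-- ===== PORT B =====
-- ''.join(next(letters) if c.isalpha() else c for c in w): consume ls at each alpha position
def pvBWeave : List Char → List Char → List Char
  | [], _ => []
  | c :: cs, ls =>
    if PySem.Chars.isalpha c then
      match ls with
      | [] => []            -- unreachable: the iterator holds exactly one letter per alpha position
      | l :: ls' => l :: pvBWeave cs ls'
    else c :: pvBWeave cs ls

def reverse_text_alt (text : String) : String :=
  if text.toList.length < 2 then text
  else String.ofList (PySem.Chars.join [' ']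
    ((PySem.Chars.split₀ text.toList).map
      (fun w => pvBWeave w ((w.filter PySem.Chars.isalpha).reverse))))

-- ===== PRECONDITION & SPEC =====
def Spec_reverse_text (text : String) (out : String) : Prop := out = reverse_text_alt text
instance (text : String) (out : String) : Decidable (Spec_reverse_text text out) := by unfold Spec_reverse_text; infer_instance

-- ===== CLAIM (what is proved, stated in full; the proofs are below) =====
def Claim_equal_reverse_text : Prop := ∀ (text : String), Dom_reverse_text text → Spec_reverse_text text (reverse_text text)

-- ===== LEMMAS AND PROOFS =====

-- the alpha/not_alpha loop is a partition of the enumerated word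
lemma pvFoldl_partition (ps : List (Int × Char)) (a0 : List Char) (n0 : List (Int × Char)) :
    ps.foldl
      (fun (st : List Char × List (Int × Char)) p =>
        if PySem.Chars.isalpha p.2 then (st.1 ++ [p.2], st.2) else (st.1, st.2 ++ [p]))
      (a0, n0)
    = (a0 ++ (ps.map (·.2)).filter PySem.Chars.isalpha,
       n0 ++ ps.filter (fun p => !PySem.Chars.isalpha p.2)) := by
  induction ps generalizing a0 n0 with
  | nil => simp
  | cons p ps ih =>
    by_cases h : PySem.Chars.isalpha p.2 = true
    · simp [h, ih]
    · simp [h, ih]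

-- inserting the non-alpha chars back at their recorded indices is the weave with the reversed letters
lemma pvInsert_weave : ∀ (w pre ra : List Char),
    ra.length = (w.filter PySem.Chars.isalpha).length →
    ((PySem.List.enumerate w (pre.length : Int)).filter (fun p => !PySem.Chars.isalpha p.2)).foldl
        (fun l p => PySem.List.insert l p.1 p.2) (pre ++ ra)
    = pre ++ pvBWeave w ra := by
  intro w
  induction w with
  | nil =>
    intro pre ra h
    simp at h
    simp [PySem.List.enumerate_nil, pvBWeave, h]
  | cons c cs ih =>
    intro pre ra h
    rw [PySem.List.enumerate_cons]
    by_cases hc : PySem.Chars.isalpha c = true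
    · cases ra with
      | nil => simp [hc] at h
      | cons r ra' =>
        simp only [List.filter_cons, hc, Bool.not_true, pvBWeave]
        have h' : ra'.length = (cs.filter PySem.Chars.isalpha).length := by
          simp [hc] at h; omega
        have := ih (pre ++ [r]) ra' h'
        simpa using this
    · rw [Bool.not_eq_true] at hc
      have h' : ra.length = (cs.filter PySem.Chars.isalpha).length := by
        simpa [hc] using h
      have hle : pre.length ≤ (pre ++ ra).length := by simp
      simp only [List.filter_cons, hc, Bool.not_false, if_true, List.foldl_cons, pvBWeave,
        Bool.false_eq_true, if_false]
      rw [PySem.List.insert_natCast _ _ _ hle, List.take_left, List.drop_left]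
      have := ih (pre ++ [c]) ra h'
      simpa using this

lemma pvAWord_eq (w : List Char) :
    pvAWord w = pvBWeave w ((w.filter PySem.Chars.isalpha).reverse) := by
  unfold pvAWord
  rw [pvFoldl_partition]
  simp only [List.nil_append, PySem.List.map_snd_enumerate]
  have h : ((w.filter PySem.Chars.isalpha).reverse).length
      = (w.filter PySem.Chars.isalpha).length := by simp
  have := pvInsert_weave w [] ((w.filter PySem.Chars.isalpha).reverse) h
  simpa using this

lemma pvFoldl_map (l : List (List Char)) (acc : List (List Char)) :
    l.foldl (fun acc w => acc ++ [pvAWord w]) acc = acc ++ l.map pvAWord := by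
  induction l generalizing acc with
  | nil => simp
  | cons x xs ih => simp [ih]

-- ===== VERDICT (by name: the statement is the Claim_ definition above) =====
theorem reverse_text_spec : Claim_equal_reverse_text := by
  intro text _
  unfold Spec_reverse_text reverse_text reverse_text_alt
  split
  · rfl
  · rw [pvFoldl_map, List.nil_append,
      List.map_congr_left (fun w _ => pvAWord_eq w)]
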